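-- pv_equiv track=rewrite | github.com/UlugbekMuslitdinov/CSC120 | street.py | has_park
-- ===== SOURCE A (Python) =====
-- def has_park(obj):
--     """
--     This function checks if the street map has a park
--
--     Parameters:
--         obj (list): list of objects
--
--     Returns:
--         bool: True if the street map has a park, False otherwise
--
--     Pre-conditions:
--         obj is a list
--
--     Post-conditions:
--         returns True if the street map has a park, False otherwise
--     """
--     if len(obj) == 0:
--         return False
--     else:
--         current_object = obj[0].split(":")
--         if current_object[0] == "p":
--             return True
--         else:
--             return has_park(obj[1:])
-- ===== SOURCE B (Python) =====
-- def has_park(obj):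
--     for item in obj:
--         fields = item.split(":")
--         if fields[0] == "p":
--             return True
--     return False
-- ===== Notes on version B (the rewrite author's own statement) =====
-- stated objective: faster
-- what changed: Replaced the tail recursion on obj[1:] (which copies the remaining list at every step and hits the recursion limit on large inputs) with a single explicit for-loop that splits each element and returns True on the first 'p' field.
import Mathlib
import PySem

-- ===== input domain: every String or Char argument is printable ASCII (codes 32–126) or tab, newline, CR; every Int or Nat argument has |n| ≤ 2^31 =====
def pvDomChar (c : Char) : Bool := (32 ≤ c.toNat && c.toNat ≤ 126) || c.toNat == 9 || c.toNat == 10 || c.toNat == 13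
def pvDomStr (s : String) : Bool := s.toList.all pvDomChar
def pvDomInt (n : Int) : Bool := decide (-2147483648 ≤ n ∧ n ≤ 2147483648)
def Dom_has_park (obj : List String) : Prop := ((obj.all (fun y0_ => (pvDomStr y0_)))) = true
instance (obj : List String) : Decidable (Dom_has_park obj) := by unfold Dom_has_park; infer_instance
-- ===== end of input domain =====

-- B replaces A's tail recursion on obj[1:] with one explicit for-loop (same split-and-test body); return value only.

-- ===== PORT A =====
-- literal transliteration of A: empty check, split obj[0] on ":", test first field, recurse on the tail slice.
-- split(":") never yields an empty list, so current_object[0] is ported as headD "" (exact).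
def has_park (obj : List String) : Bool :=
  match obj with
  | [] => false
  | x :: rest =>
    if (((PySem.Str.split? x ":").getD [])).headD "" == "p" then true
    else has_park rest

-- ===== PORT B =====
-- Source B's for-loop with early return, as a fold carrying the 'already returned True' flag
def has_park_alt (obj : List String) : Bool :=
  obj.foldl (fun acc item =>
    if acc then acc
    else (((PySem.Str.split? item ":").getD [])).headD "" == "p") false

-- ===== PRECONDITION & SPEC =====
def Spec_has_park (obj : List String) (out : Bool) : Prop := out = has_park_alt obj
instance (obj : List String) (out : Bool) : Decidable (Spec_has_park obj out) := by unfold Spec_has_park; infer_instance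

-- ===== CLAIM (what is proved, stated in full; the proofs are below) =====
def Claim_equal_has_park : Prop := ∀ (obj : List String), Dom_has_park obj → Spec_has_park obj (has_park obj)

-- ===== LEMMAS AND PROOFS =====
-- once B's loop flag is true it stays true
theorem flag_true (g : String → Bool) (l : List String) :
    List.foldl (fun acc item => if acc then acc else g item) true l = true := by
  induction l with
  | nil => rfl
  | cons x rest ih => simpa using ih

-- one step of B's loop from a false flag
theorem flag_cons (g : String → Bool) (x : String) (l : List String) :
    List.foldl (fun acc item => if acc then acc else g item) false (x :: l)
      = (if g x then true else List.foldl (fun acc item => if acc then acc else g item) false l) := by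
  cases hg : g x with
  | true => simp [hg, flag_true]
  | false => simp [hg]

theorem has_park_eq (obj : List String) : has_park obj = has_park_alt obj := by
  induction obj with
  | nil => rfl
  | cons x rest ih =>
    rw [show has_park_alt (x :: rest)
          = (if ((PySem.Str.split? x ":").getD []).headD "" == "p" then true else has_park_alt rest)
        from flag_cons _ x rest]
    simp only [has_park]
    rw [ih]

-- ===== VERDICT (by name: the statement is the Claim_ definition above) =====
theorem has_park_spec : Claim_equal_has_park := by
  intro obj _
  unfold Spec_has_park
  exact has_park_eq obj
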